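-- pv_equiv track=rewrite | github.com/flaflaGit/GitHub_activite2 | carte.py | creer_labyrinthe_depuis_chaine
-- ===== SOURCE A (Python) =====
-- def creer_labyrinthe_depuis_chaine(chaine):
--     """ on transforme la chaine en 1 type dict pour stocker le labyrinthe
--         (on aura un clé représentée par un tuple : (ordonnee, abcisse))
--             Les valeurs possibe dans la chaine sont :
--             'O' : pour un mur
--             '.' : pour une porte
--             ' ' : pour un vide
--             'U' : pour la sortie
--             'X' : la position de départ pour le robot ==> si existe, on remplace par un vide
--     """
--     lab=dict()
--     i=1
--     j=1
--     for c in chaine: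
--         if c=='\n':
--             j += 1
--             i = 1
--         else:
--             if c.upper()=='X':
--                 c=' '
--             lab[j,i] = c
--             i += 1
--     return lab
-- ===== SOURCE B (Python) =====
-- def creer_labyrinthe_depuis_chaine(chaine):
--     """Two staged passes: first record the absolute offsets of the newlines,
--     then walk each segment between consecutive offsets, deriving (row, column)
--     arithmetically from the absolute character position."""
--     bornes = [-1] + [p for p, c in enumerate(chaine) if c == '\n'] + [len(chaine)]
--     lab = {}
--     for j, (a, b) in enumerate(zip(bornes, bornes[1:]), 1):
--         for p in range(a + 1, b):
--             c = chaine[p]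
--             lab[j, p - a] = ' ' if c.upper() == 'X' else c
--     return lab
-- ===== Notes on version B (the rewrite author's own statement) =====
-- stated objective: alternative
-- what changed: Replaced A's single-pass character state machine (mutable row/column counters reset at each newline) by two staged passes: first collect the absolute offsets of all newlines, then iterate the segments between consecutive offsets and derive each (row, column) key arithmetically from the absolute character position.
import Mathlib
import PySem

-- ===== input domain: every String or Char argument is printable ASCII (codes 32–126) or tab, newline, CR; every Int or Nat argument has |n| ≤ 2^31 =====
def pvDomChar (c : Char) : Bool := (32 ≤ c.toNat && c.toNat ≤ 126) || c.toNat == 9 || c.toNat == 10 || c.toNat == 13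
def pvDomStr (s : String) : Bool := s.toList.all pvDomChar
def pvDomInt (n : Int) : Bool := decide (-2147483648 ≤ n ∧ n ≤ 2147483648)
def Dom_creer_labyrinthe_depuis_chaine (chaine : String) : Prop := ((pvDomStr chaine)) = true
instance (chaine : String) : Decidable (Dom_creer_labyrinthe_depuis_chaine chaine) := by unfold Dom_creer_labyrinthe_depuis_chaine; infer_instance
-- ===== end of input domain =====

-- B replaces A's char-by-char state machine by two staged passes: collect newline offsets, then fill segments with coordinates derived arithmetically from absolute positions (alternative; same cost).


-- ===== PORT A =====
-- A: one pass over the characters with mutable state (lab, i, j); '\n' resets i and bumps j.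
def creer_labyrinthe_depuis_chaine (chaine : String) : List (Int × Int × String) :=
  (chaine.toList.foldl
    (fun (s : PySem.Dict (Int × Int) String × Int × Int) c =>
      if c == '\n' then (s.1, (1 : Int), s.2.2 + 1)
      else (s.1.insert (s.2.2, s.2.1)
              (String.ofList [if PySem.Chars.upperChar c == 'X' then ' ' else c]), s.2.1 + 1, s.2.2))
    (PySem.Dict.empty, 1, 1)).1.items.map (fun p => (p.1.1, p.1.2, p.2))

-- ===== PORT B =====
-- B: pass 1 collects the absolute offsets of the newlines (bornes = [-1] + offsets + [len]);
-- pass 2 walks each segment between consecutive bornes, key = (j, p - a) from the absolute position p.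
-- chaine[p] is ported as (pyGet? …).getD ' ': p always satisfies a+1 ≤ p < b ≤ len, so pyGet? is `some` and the default is unreachable.
def creer_labyrinthe_depuis_chaine_alt (chaine : String) : List (Int × Int × String) :=
  let cs := chaine.toList
  let bornes : List Int :=
    -1 :: (((PySem.List.enumerate cs 0).filter (fun pc => pc.2 == '\n')).map (fun pc => pc.1)
            ++ [(cs.length : Int)])
  ((PySem.List.enumerate (bornes.zip (PySem.List.slice bornes (some 1) none)) 1).foldl
    (fun (lab : PySem.Dict (Int × Int) String) jab =>
      (PySem.List.pyRange (jab.2.1 + 1) jab.2.2 1).foldl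
        (fun (lab : PySem.Dict (Int × Int) String) p =>
          let c := (PySem.List.pyGet? cs p).getD ' '
          lab.insert (jab.1, p - jab.2.1)
            (String.ofList [if PySem.Chars.upperChar c == 'X' then ' ' else c]))
        lab)
    PySem.Dict.empty).items.map (fun p => (p.1.1, p.1.2, p.2))

-- ===== PRECONDITION & SPEC =====
def Spec_creer_labyrinthe_depuis_chaine (chaine : String) (out : List (Int × Int × String)) : Prop := out = creer_labyrinthe_depuis_chaine_alt chaine
instance (chaine : String) (out : List (Int × Int × String)) : Decidable (Spec_creer_labyrinthe_depuis_chaine chaine out) := by unfold Spec_creer_labyrinthe_depuis_chaine; infer_instance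

-- ===== CLAIM (what is proved, stated in full; the proofs are below) =====
def Claim_equal_creer_labyrinthe_depuis_chaine : Prop := ∀ (chaine : String), Dom_creer_labyrinthe_depuis_chaine chaine → Spec_creer_labyrinthe_depuis_chaine chaine (creer_labyrinthe_depuis_chaine chaine)

-- ===== LEMMAS AND PROOFS =====

-- The stored cell for a character.
def pvCell (c : Char) : String := String.ofList [if PySem.Chars.upperChar c == 'X' then ' ' else c]

-- Entries contributed by one line l at row j, first column i.
def pvLineEnts (j : Int) (l : List Char) (i : Int) : List ((Int × Int) × String) :=
  (PySem.List.enumerate l i).map (fun ic => ((j, ic.1), pvCell ic.2))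

-- Entries of all lines, first line starting at column i, later lines at column 1.
def pvAllEnts : List (List Char) → Int → Int → List ((Int × Int) × String)
  | [], _, _ => []
  | l :: ls, j, i => pvLineEnts j l i ++ pvAllEnts ls (j + 1) 1

-- Reference line split on '\n'.
def pvSplit : List Char → List Char → List (List Char)
  | [], cur => [cur.reverse]
  | c :: r, cur => if c = '\n' then cur.reverse :: pvSplit r [] else pvSplit r (c :: cur)

-- Newline offsets of cs, counting from off (the literal expression of port B's first pass).
def pvNL (cs : List Char) (off : Int) : List Int :=
  ((PySem.List.enumerate cs off).filter (fun pc => pc.2 == '\n')).map (fun pc => pc.1)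

theorem pvSplit_shift : ∀ (l cur : List Char), ∃ h t, pvSplit l [] = h :: t ∧ pvSplit l cur = (cur.reverse ++ h) :: t := by
  intro l
  induction l with
  | nil => intro cur; exact ⟨[], [], by simp [pvSplit]⟩
  | cons c r ih =>
    intro cur
    by_cases hc : c = '\n'
    · exact ⟨[], pvSplit r [], by simp [pvSplit, hc]⟩
    · obtain ⟨h, t, h1, h2⟩ := ih (c :: cur)
      obtain ⟨h', t', h1', h2'⟩ := ih [c]
      rw [h1] at h1'
      injection h1' with e1 e2
      subst e1; subst e2
      refine ⟨c :: h, t, ?_, ?_⟩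
      · simpa [pvSplit, hc] using h2'
      · simp only [pvSplit, hc, if_false]
        rw [h2]; simp

theorem pvKeys_lineEnts (j : Int) (l : List Char) (i : Int) :
    ∀ p ∈ pvLineEnts j l i, p.1.1 = j := by
  intro p hp
  simp only [pvLineEnts, List.mem_map] at hp
  obtain ⟨ic, _, rfl⟩ := hp
  rfl

theorem pvLine_fold (l : List Char) (j : Int) (i : Int) (lab : PySem.Dict (Int × Int) String)
    (hinv : ∀ k ∈ lab.keys, k.1 < j ∨ (k.1 = j ∧ k.2 < i)) :
    ((PySem.List.enumerate l i).foldl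
      (fun (lab : PySem.Dict (Int × Int) String) ic =>
        lab.insert (j, ic.1) (String.ofList [if PySem.Chars.upperChar ic.2 == 'X' then ' ' else ic.2]))
      lab).items = lab.items ++ pvLineEnts j l i := by
  have h1 : ∀ a ∈ PySem.List.enumerate l i, lab.contains ((j : Int), a.1) = false := by
    intro a ha
    rw [PySem.List.mem_enumerate_iff] at ha
    obtain ⟨k, hk, rfl⟩ := ha
    by_contra hcon
    have : ((j, i + k) : Int × Int) ∈ lab.keys := by
      rw [← PySem.Dict.contains_iff_mem_keys]
      simpa using hcon
    rcases hinv _ this with h | ⟨_, h⟩ <;> simp at h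
    omega
  have h2 : ((PySem.List.enumerate l i).map (fun ic => ((j, ic.1) : Int × Int))).Nodup := by
    have := PySem.List.pairwise_lt_enumerate (xs := l) (s := i)
    refine List.Pairwise.map _ ?_ this
    intro a b hab
    simp only [ne_eq, Prod.mk.injEq]
    rintro ⟨_, h⟩; omega
  have := PySem.Dict.items_foldl_insert_fresh (l := PySem.List.enumerate l i)
    (k := fun ic => ((j, ic.1) : Int × Int))
    (v := fun ic => String.ofList [if PySem.Chars.upperChar ic.2 == 'X' then ' ' else ic.2])
    (d := lab) h1 h2
  rw [this]
  rfl

theorem pvA_fold (cs : List Char) : ∀ (lab : PySem.Dict (Int × Int) String) (i j : Int),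
    (∀ k ∈ lab.keys, k.1 < j ∨ (k.1 = j ∧ k.2 < i)) →
    (cs.foldl
      (fun (s : PySem.Dict (Int × Int) String × Int × Int) c =>
        if c == '\n' then (s.1, (1 : Int), s.2.2 + 1)
        else (s.1.insert (s.2.2, s.2.1)
                (String.ofList [if PySem.Chars.upperChar c == 'X' then ' ' else c]), s.2.1 + 1, s.2.2))
      (lab, i, j)).1.items = lab.items ++ pvAllEnts (pvSplit cs []) j i := by
  induction cs with
  | nil =>
    intro lab i j _
    simp [pvSplit, pvAllEnts, pvLineEnts, PySem.List.enumerate_nil]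
  | cons c r ih =>
    intro lab i j hinv
    rw [List.foldl_cons]
    by_cases hc : c = '\n'
    · subst hc
      rw [if_pos (by decide)]
      rw [ih lab 1 (j + 1) (fun k hk => by rcases hinv k hk with h | ⟨h, _⟩ <;> exact Or.inl (by omega))]
      simp [pvSplit, pvAllEnts, pvLineEnts, PySem.List.enumerate_nil]
    · rw [if_neg (by simpa using hc)]
      have hfresh : lab.contains ((j, i) : Int × Int) = false := by
        by_contra hcon
        have : ((j, i) : Int × Int) ∈ lab.keys := by
          rw [← PySem.Dict.contains_iff_mem_keys]; simpa using hcon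
        rcases hinv _ this with h | ⟨_, h⟩ <;> simp at h
      have hinv' : ∀ k ∈ (lab.insert ((j, i) : Int × Int)
          (String.ofList [if PySem.Chars.upperChar c == 'X' then ' ' else c])).keys,
          k.1 < j ∨ (k.1 = j ∧ k.2 < i + 1) := by
        intro k hk
        rw [PySem.Dict.mem_keys_insert] at hk
        rcases hk with rfl | hk
        · exact Or.inr ⟨rfl, by omega⟩
        · rcases hinv k hk with h | ⟨h1, h2⟩
          · exact Or.inl h
          · exact Or.inr ⟨h1, by omega⟩
      rw [ih _ (i + 1) j hinv']
      rw [PySem.Dict.items_insert_of_not_contains _ _ hfresh]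
      obtain ⟨h, t, h1, h2⟩ := pvSplit_shift r [c]
      simp only [pvSplit, hc, if_false]
      rw [h2, h1]
      simp only [pvAllEnts, pvLineEnts, PySem.List.enumerate_cons, List.map_cons, List.reverse_singleton,
        List.singleton_append]
      simp [pvCell, List.append_assoc]

-- ---- B-side lemmas ----

theorem pvNL_nil (off : Int) : pvNL [] off = [] := by
  simp [pvNL, PySem.List.enumerate_nil]

theorem pvNL_cons (c : Char) (r : List Char) (off : Int) :
    pvNL (c :: r) off = if c = '\n' then off :: pvNL r (off + 1) else pvNL r (off + 1) := by
  by_cases hc : c = '\n' <;> simp [pvNL, PySem.List.enumerate_cons, hc]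

theorem pvNL_noNl (l : List Char) (h : '\n' ∉ l) : ∀ off, pvNL l off = [] := by
  induction l with
  | nil => intro off; exact pvNL_nil off
  | cons c r ih =>
    intro off
    rw [pvNL_cons, if_neg (fun e => h (by simp [e]))]
    exact ih (fun hm => h (List.mem_cons_of_mem _ hm)) _

theorem pvNL_split (l r : List Char) (h : '\n' ∉ l) : ∀ off,
    pvNL (l ++ '\n' :: r) off = (off + l.length) :: pvNL r (off + l.length + 1) := by
  induction l with
  | nil => intro off; rw [List.nil_append, pvNL_cons, if_pos rfl]; norm_num
  | cons c l' ih =>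
    intro off
    rw [List.cons_append, pvNL_cons, if_neg (fun e => h (by simp [e]))]
    rw [ih (fun hm => h (List.mem_cons_of_mem _ hm)) (off + 1)]
    rw [show off + 1 + (l'.length : Int) = off + ((c :: l').length : Int) from by
      push_cast [List.length_cons]; ring]

theorem pvSplit_noNl (l : List Char) (h : '\n' ∉ l) : ∀ cur, pvSplit l cur = [cur.reverse ++ l] := by
  induction l with
  | nil => intro cur; simp [pvSplit]
  | cons c r ih =>
    intro cur
    rw [pvSplit, if_neg (fun e => h (by simp [e]))]
    rw [ih (fun hm => h (List.mem_cons_of_mem _ hm)) (c :: cur)]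
    simp

theorem pvSplit_split (l r : List Char) (h : '\n' ∉ l) : ∀ cur,
    pvSplit (l ++ '\n' :: r) cur = (cur.reverse ++ l) :: pvSplit r [] := by
  induction l with
  | nil => intro cur; simp [pvSplit]
  | cons c l' ih =>
    intro cur
    rw [List.cons_append, pvSplit, if_neg (fun e => h (by simp [e]))]
    rw [ih (fun hm => h (List.mem_cons_of_mem _ hm)) (c :: cur)]
    simp

theorem pvDecomp (r : List Char) (h : '\n' ∈ r) : ∃ l r', r = l ++ '\n' :: r' ∧ '\n' ∉ l := by
  induction r with
  | nil => cases h
  | cons c t ih =>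
    by_cases hc : c = '\n'
    · exact ⟨[], t, by simp [hc], by simp⟩
    · rcases List.mem_cons.mp h with e | hm
      · exact absurd e.symm hc
      · obtain ⟨l, r', h1, h2⟩ := ih hm
        exact ⟨c :: l, r', by simp [h1], by simp [Ne.symm hc, h2]⟩

-- A segment walked by absolute position equals the line enumerated from column (len pre - a).
theorem pvRange_line (l : List Char) : ∀ (pre rest : List Char) (j a : Int) (lab : PySem.Dict (Int × Int) String),
    ((PySem.List.pyRange (pre.length : Int) ((pre.length : Int) + l.length) 1).foldl
      (fun (lab : PySem.Dict (Int × Int) String) p =>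
        lab.insert (j, p - a)
          (String.ofList [if PySem.Chars.upperChar ((PySem.List.pyGet? (pre ++ l ++ rest) p).getD ' ') == 'X'
            then ' ' else ((PySem.List.pyGet? (pre ++ l ++ rest) p).getD ' ')]))
      lab)
    = (PySem.List.enumerate l ((pre.length : Int) - a)).foldl
      (fun (lab : PySem.Dict (Int × Int) String) ic =>
        lab.insert (j, ic.1) (String.ofList [if PySem.Chars.upperChar ic.2 == 'X' then ' ' else ic.2]))
      lab := by
  induction l with
  | nil =>
    intro pre rest j a lab
    rw [PySem.List.pyRange_one_eq_nil (by simp)]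
    simp [PySem.List.enumerate_nil]
  | cons c l' ih =>
    intro pre rest j a lab
    rw [PySem.List.pyRange_one_cons (by simp only [List.length_cons]; push_cast; omega), List.foldl_cons]
    have hget : (PySem.List.pyGet? (pre ++ (c :: l') ++ rest) (pre.length : Int)).getD ' ' = c := by
      rw [PySem.List.pyGet?_natCast]
      simp
    rw [hget]
    have e2 : (pre.length : Int) + ((c :: l').length : Int) = ((pre ++ [c]).length : Int) + (l'.length : Int) := by
      simp only [List.length_append, List.length_cons, List.length_nil]; push_cast; ring
    have e3 : pre ++ (c :: l') ++ rest = (pre ++ [c]) ++ l' ++ rest := by simp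
    have e1 : (pre.length : Int) + 1 = ((pre ++ [c]).length : Int) := by simp
    rw [PySem.List.enumerate_cons, List.foldl_cons]
    rw [e2, e3, e1]
    rw [ih (pre ++ [c]) rest j a]
    rw [show ((pre ++ [c]).length : Int) - a = (pre.length : Int) - a + 1 from by
      simp only [List.length_append, List.length_cons, List.length_nil]; push_cast; ring]

-- Main B invariant: folding the zipped boundary pairs of the suffix r (located after pre) appends
-- exactly the entries of r's lines, rows starting at j.
theorem pvB_main (n : Nat) : ∀ (r pre : List Char), r.length ≤ n → (cs : List Char) → cs = pre ++ r →
    ∀ (j : Int) (lab : PySem.Dict (Int × Int) String), (∀ k ∈ lab.keys, k.1 < j) →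
    ((PySem.List.enumerate
        ((((pre.length : Int) - 1) :: (pvNL r pre.length ++ [(pre.length : Int) + r.length])).zip
          (pvNL r pre.length ++ [(pre.length : Int) + r.length])) j).foldl
      (fun (lab : PySem.Dict (Int × Int) String) jab =>
        (PySem.List.pyRange (jab.2.1 + 1) jab.2.2 1).foldl
          (fun (lab : PySem.Dict (Int × Int) String) p =>
            lab.insert (jab.1, p - jab.2.1)
              (String.ofList [if PySem.Chars.upperChar ((PySem.List.pyGet? cs p).getD ' ') == 'X'
                then ' ' else ((PySem.List.pyGet? cs p).getD ' ')]))
          lab)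
      lab).items = lab.items ++ pvAllEnts (pvSplit r []) j 1 := by
  induction n with
  | zero =>
    intro r pre hn cs hcs j lab hinv
    have hr : r = [] := List.length_eq_zero_iff.mp (Nat.le_zero.mp hn)
    subst hr
    rw [pvNL_nil]
    simp only [List.nil_append, List.length_nil, Nat.cast_zero, add_zero, List.zip_cons_cons,
      List.zip_nil_left, PySem.List.enumerate_cons, PySem.List.enumerate_nil, List.foldl_cons,
      List.foldl_nil]
    rw [PySem.List.pyRange_one_eq_nil (by omega), List.foldl_nil]
    simp [pvSplit, pvAllEnts, pvLineEnts, PySem.List.enumerate_nil]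
  | succ m ih =>
    intro r pre hn cs hcs j lab hinv
    by_cases hmem : '\n' ∈ r
    · obtain ⟨l, r', rfl, hl⟩ := pvDecomp r hmem
      rw [pvNL_split l r' hl]
      simp only [List.cons_append]
      have hpre' : ((pre ++ l ++ ['\n']).length : Int) = (pre.length : Int) + (l.length : Int) + 1 := by
        simp only [List.length_append, List.length_cons, List.length_nil]; push_cast; ring
      rw [List.zip_cons_cons, PySem.List.enumerate_cons, List.foldl_cons]
      rw [show ((pre.length : Int) - 1) + 1 = (pre.length : Int) from by ring]
      have hcs' : cs = pre ++ l ++ ('\n' :: r') := by rw [hcs]; simp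
      rw [hcs']
      rw [pvRange_line l pre ('\n' :: r') j ((pre.length : Int) - 1) lab]
      have hinv2 : ∀ k ∈ ((PySem.List.enumerate l ((pre.length : Int) - ((pre.length : Int) - 1))).foldl
          (fun (lab : PySem.Dict (Int × Int) String) ic =>
            lab.insert (j, ic.1) (String.ofList [if PySem.Chars.upperChar ic.2 == 'X' then ' ' else ic.2]))
          lab).keys, k.1 < j + 1 := by
        intro k hk
        have hitems := pvLine_fold l j ((pre.length : Int) - ((pre.length : Int) - 1)) lab
          (fun k hk => Or.inl (hinv k hk))
        simp only [PySem.Dict.keys, hitems, List.map_append, List.mem_append, List.mem_map] at hk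
        rcases hk with hk | ⟨p, hp, rfl⟩
        · have := hinv k (by simpa [PySem.Dict.keys] using hk); omega
        · have := pvKeys_lineEnts j l _ p hp; omega
      have hrec := ih r' (pre ++ l ++ ['\n'])
        (by simp only [List.length_append, List.length_cons] at hn ⊢; omega)
        cs (by rw [hcs]; simp) (j + 1) _ hinv2
      rw [hpre'] at hrec
      rw [show ((pre.length : Int) + (l.length : Int) + 1) - 1 = (pre.length : Int) + (l.length : Int) from by ring] at hrec
      rw [show ((pre.length : Int) + (l.length : Int) + 1) + (r'.length : Int)
            = (pre.length : Int) + ((l ++ '\n' :: r').length : Int) from by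
        simp only [List.length_append, List.length_cons, List.length_nil]; push_cast; ring] at hrec
      rw [hcs'] at hrec
      rw [hrec]
      rw [pvLine_fold l j _ lab (fun k hk => Or.inl (hinv k hk))]
      rw [pvSplit_split l r' hl []]
      simp only [List.reverse_nil, List.nil_append, pvAllEnts]
      rw [show (pre.length : Int) - ((pre.length : Int) - 1) = 1 from by ring]
      simp [List.append_assoc]
    · -- no newline in r: a single boundary pair, a single line
      rw [pvNL_noNl r hmem]
      simp only [List.nil_append, List.zip_cons_cons, List.zip_nil_left, List.zip_nil_right,
        PySem.List.enumerate_cons, PySem.List.enumerate_nil, List.foldl_cons, List.foldl_nil]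
      have hshift : ((pre.length : Int) - 1) + 1 = (pre.length : Int) := by omega
      have hcs' : cs = pre ++ r ++ [] := by rw [hcs]; simp
      rw [hshift, hcs']
      rw [pvRange_line r pre [] j ((pre.length : Int) - 1) lab]
      rw [pvLine_fold r j _ lab (fun k hk => Or.inl (hinv k hk))]
      rw [pvSplit_noNl r hmem []]
      simp only [List.reverse_nil, List.nil_append, pvAllEnts, List.append_nil]
      have hcol : (pre.length : Int) - ((pre.length : Int) - 1) = 1 := by ring
      rw [hcol]

-- ===== VERDICT (by name: the statement is the Claim_ definition above) =====
theorem creer_labyrinthe_depuis_chaine_spec : Claim_equal_creer_labyrinthe_depuis_chaine := by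
  intro chaine _
  unfold Spec_creer_labyrinthe_depuis_chaine creer_labyrinthe_depuis_chaine creer_labyrinthe_depuis_chaine_alt
  simp only [PySem.List.slice_from_one, List.tail_cons]
  rw [pvA_fold chaine.toList PySem.Dict.empty 1 1 (by simp [PySem.Dict.keys_empty])]
  have := pvB_main chaine.toList.length chaine.toList [] le_rfl chaine.toList (by simp)
    1 PySem.Dict.empty (by simp [PySem.Dict.keys_empty])
  simp only [List.length_nil, Nat.cast_zero, zero_sub, zero_add, pvNL] at this
  rw [this]
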